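-- pv_equiv track=rewrite | github.com/diogoaccsoares-ux/Commutation-Classes | commutation_graph_D.py | ordem_neg
-- ===== SOURCE A (Python) =====
-- n=4 #ordem do grafo
--
-- def ordem_neg(rep):
--     aux=[i for i in range(1,n+1)]
--     contagem={}
--     for i in range(1,n+1):
--         contagem[i]=0
--
--     for i in rep:
--         if(i==0):
--             aux[0]=-aux[0]
--         else:
--             aux[i-1],aux[i]=aux[i],aux[i-1]
--         for ii in range(1,n+1):
--             if(aux[ii-1]==-ii):
--                 contagem[ii]+=1
--     return contagem
-- ===== SOURCE B (Python) =====
-- n = 4  # ordem do grafo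
--
-- def ordem_neg(rep):
--     # Phase 1: materialize the table of successive states of aux.
--     aux = list(range(1, n + 1))
--     states = []
--     for i in rep:
--         if i == 0:
--             aux[0] = -aux[0]
--         else:
--             aux[i - 1], aux[i] = aux[i], aux[i - 1]
--         states.append(aux.copy())
--     # Phase 2: one counting pass per position over the state table.
--     return {ii: sum(1 for s in states if s[ii - 1] == -ii)
--             for ii in range(1, n + 1)}
-- ===== Notes on version B (the rewrite author's own statement) =====
-- stated objective: alternative
-- what changed: B splits A's fused step-then-scan loop into two phases: it first materializes the list of aux snapshots along the walk, then builds the answer with a separate counting pass per position over that state table.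
import Mathlib
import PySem

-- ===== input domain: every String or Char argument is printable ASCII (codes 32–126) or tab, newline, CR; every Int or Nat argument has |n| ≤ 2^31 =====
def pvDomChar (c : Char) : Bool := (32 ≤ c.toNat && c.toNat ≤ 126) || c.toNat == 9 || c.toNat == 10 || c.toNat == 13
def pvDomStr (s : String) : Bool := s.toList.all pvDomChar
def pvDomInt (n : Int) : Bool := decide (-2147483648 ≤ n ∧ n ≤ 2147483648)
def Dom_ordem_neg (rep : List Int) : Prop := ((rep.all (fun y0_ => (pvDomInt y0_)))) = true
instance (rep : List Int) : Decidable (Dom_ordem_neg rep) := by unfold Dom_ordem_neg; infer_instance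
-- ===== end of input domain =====

-- B restructures A's single fused loop (step, then scan positions, updating a count dict)
-- into two phases: build the table of aux snapshots first, then count per position (objective: alternative).

-- ===== PORT A =====
def ordem_neg (rep : List Int) : List (Int × Int) :=
  let aux0 : List Int := PySem.List.pyRange 1 (4+1) 1
  let c0 : PySem.Dict Int Int :=
    (PySem.List.pyRange 1 (4+1) 1).foldl (fun c i => c.insert i 0) PySem.Dict.empty
  (rep.foldl (fun (s : List Int × PySem.Dict Int Int) i =>
      let aux :=
        if i == 0 then PySem.List.pySetD s.1 0 (-(PySem.List.pyGetD s.1 0 0))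
        else PySem.List.pySetD
               (PySem.List.pySetD s.1 (i-1) (PySem.List.pyGetD s.1 i 0))
               i (PySem.List.pyGetD s.1 (i-1) 0)
      let c := (PySem.List.pyRange 1 (4+1) 1).foldl (fun c ii =>
          if PySem.List.pyGetD aux (ii-1) 0 == -ii then c.modify ii 0 (· + 1) else c) s.2
      (aux, c)) (aux0, c0)).2.items

-- ===== PORT B =====
def ordem_neg_alt (rep : List Int) : List (Int × Int) :=
  -- Phase 1: table of successive states of aux
  let states : List (List Int) :=
    (rep.foldl (fun (p : List Int × List (List Int)) i =>
        let aux :=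
          if i == 0 then PySem.List.pySetD p.1 0 (-(PySem.List.pyGetD p.1 0 0))
          else PySem.List.pySetD
                 (PySem.List.pySetD p.1 (i-1) (PySem.List.pyGetD p.1 i 0))
                 i (PySem.List.pyGetD p.1 (i-1) 0)
        (aux, p.2 ++ [aux])) (PySem.List.pyRange 1 (4+1) 1, [])).2
  -- Phase 2: dict comprehension — one counting pass per position
  ((PySem.List.pyRange 1 (4+1) 1).foldl (fun (d : PySem.Dict Int Int) ii =>
      d.insert ii (states.foldl (fun acc s =>
        if PySem.List.pyGetD s (ii-1) 0 == -ii then acc + 1 else acc) 0))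
    PySem.Dict.empty).items

-- ===== PRECONDITION & SPEC =====
-- Pre_ excludes exactly the inputs where Python A raises IndexError: some i in rep with
-- i > 3 (aux[i] out of range) or i < -3 (aux[i-1] out of range). B raises there too.
def Pre_ordem_neg (rep : List Int) : Prop := ∀ i ∈ rep, -3 ≤ i ∧ i ≤ 3
instance (rep : List Int) : Decidable (Pre_ordem_neg rep) := by unfold Pre_ordem_neg; infer_instance
def pvWitness_ordem_neg : List Int := [0, 1, 2, 0, -1, 3]
def Spec_ordem_neg (rep : List Int) (out : List (Int × Int)) : Prop := out = ordem_neg_alt rep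
instance (rep : List Int) (out : List (Int × Int)) : Decidable (Spec_ordem_neg rep out) := by unfold Spec_ordem_neg; infer_instance

-- ===== CLAIM (what is proved, stated in full; the proofs are below) =====
def Claim_equal_ordem_neg : Prop := ∀ (rep : List Int), Dom_ordem_neg rep → Pre_ordem_neg rep → Spec_ordem_neg rep (ordem_neg rep)

-- ===== LEMMAS AND PROOFS =====

-- the aux update both programs perform for one symbol
def pvStep (a : List Int) (i : Int) : List Int :=
  if i == 0 then PySem.List.pySetD a 0 (-(PySem.List.pyGetD a 0 0))
  else PySem.List.pySetD (PySem.List.pySetD a (i-1) (PySem.List.pyGetD a i 0))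
         i (PySem.List.pyGetD a (i-1) 0)

-- the snapshot table
def pvSnaps (a : List Int) : List Int → List (List Int)
  | [] => []
  | i :: t => pvStep a i :: pvSnaps (pvStep a i) t

def pvHit (ii : Int) (s : List Int) : Bool := PySem.List.pyGetD s (ii-1) 0 == -ii

-- one pass of A's inner position scan over the count dict
def pvUpd (aux : List Int) (c : PySem.Dict Int Int) : PySem.Dict Int Int :=
  (PySem.List.pyRange 1 (4+1) 1).foldl (fun c ii =>
    if PySem.List.pyGetD aux (ii-1) 0 == -ii then c.modify ii 0 (· + 1) else c) c

theorem pv_scan (aux : List Int) (x1 x2 x3 x4 : Int) :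
    pvUpd aux (PySem.Dict.mk [(1,x1),(2,x2),(3,x3),(4,x4)])
    = PySem.Dict.mk [(1, x1 + (if pvHit 1 aux then 1 else 0)),
                     (2, x2 + (if pvHit 2 aux then 1 else 0)),
                     (3, x3 + (if pvHit 3 aux then 1 else 0)),
                     (4, x4 + (if pvHit 4 aux then 1 else 0))] := by
  have hr : PySem.List.pyRange 1 (4+1) 1 = [1,2,3,4] := by decide
  simp only [pvUpd, hr, List.foldl_cons, List.foldl_nil, pvHit]
  split_ifs <;>
    simp_all [PySem.Dict.modify, PySem.Dict.getD, PySem.Dict.get?, PySem.Dict.insert,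
      PySem.Dict.contains]

theorem pv_A_loop (rep : List Int) : ∀ (a : List Int) (x1 x2 x3 x4 : Int),
    rep.foldl (fun (s : List Int × PySem.Dict Int Int) i =>
      (pvStep s.1 i, pvUpd (pvStep s.1 i) s.2))
      (a, PySem.Dict.mk [(1,x1),(2,x2),(3,x3),(4,x4)])
    = (rep.foldl pvStep a,
       PySem.Dict.mk [(1, x1 + ((pvSnaps a rep).countP (pvHit 1) : Int)),
                      (2, x2 + ((pvSnaps a rep).countP (pvHit 2) : Int)),
                      (3, x3 + ((pvSnaps a rep).countP (pvHit 3) : Int)),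
                      (4, x4 + ((pvSnaps a rep).countP (pvHit 4) : Int))]) := by
  induction rep with
  | nil => intro a x1 x2 x3 x4; simp [pvSnaps]
  | cons i t ih =>
    intro a x1 x2 x3 x4
    simp only [List.foldl_cons, pvSnaps]
    rw [pv_scan (pvStep a i) x1 x2 x3 x4, ih]
    simp only [List.countP_cons]
    have key : ∀ (x : Int) (b : Bool) (m : Nat),
        x + (if b then (1:Int) else 0) + (m : Int) = x + ((m + if b then 1 else 0 : Nat) : Int) := by
      intro x b m; cases b <;> push_cast <;> ring
    refine congrArg _ (congrArg _ ?_)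
    simp only [← key]

theorem pv_B_loop (rep : List Int) : ∀ (a : List Int) (acc : List (List Int)),
    rep.foldl (fun (p : List Int × List (List Int)) i =>
        (pvStep p.1 i, p.2 ++ [pvStep p.1 i])) (a, acc)
    = (rep.foldl pvStep a, acc ++ pvSnaps a rep) := by
  induction rep with
  | nil => intro a acc; simp [pvSnaps]
  | cons i t ih => intro a acc; simp [pvSnaps, ih]

-- ===== VERDICT (by name: the statement is the Claim_ definition above) =====
theorem ordem_neg_spec : Claim_equal_ordem_neg := by
  intro rep _ _
  unfold Spec_ordem_neg
  have hA : ordem_neg rep = (rep.foldl (fun (s : List Int × PySem.Dict Int Int) i =>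
      (pvStep s.1 i, pvUpd (pvStep s.1 i) s.2))
      (PySem.List.pyRange 1 (4+1) 1, PySem.Dict.mk [(1,0),(2,0),(3,0),(4,0)])).2.items := rfl
  have hB : ordem_neg_alt rep =
      ((PySem.List.pyRange 1 (4+1) 1).foldl (fun (d : PySem.Dict Int Int) ii =>
        d.insert ii (((rep.foldl (fun (p : List Int × List (List Int)) i =>
            (pvStep p.1 i, p.2 ++ [pvStep p.1 i])) (PySem.List.pyRange 1 (4+1) 1, [])).2).foldl
          (fun acc s => if PySem.List.pyGetD s (ii-1) 0 == -ii then acc + 1 else acc) 0))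
        PySem.Dict.empty).items := rfl
  rw [hA, hB, pv_A_loop, pv_B_loop]
  have hr : PySem.List.pyRange 1 (4+1) 1 = [1,2,3,4] := by decide
  rw [hr]
  simp only [List.foldl_cons, List.foldl_nil, List.nil_append]
  have hcnt : ∀ ii : Int, (pvSnaps [1,2,3,4] rep).foldl
      (fun acc s => if PySem.List.pyGetD s (ii-1) 0 == -ii then acc + 1 else acc) (0:Int)
      = ((pvSnaps [1,2,3,4] rep).countP (pvHit ii) : Int) := by
    intro ii
    rw [PySem.List.foldl_if_add_one]
    simp only [zero_add]
    rfl
  simp only [hcnt]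
  simp [PySem.Dict.insert, PySem.Dict.contains, PySem.Dict.empty]
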